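-- pv_equiv track=rewrite | github.com/mmylei/eLearning | learning_pattern/grades_distribution.py | sum_by_user
-- ===== SOURCE A (Python) =====
-- def sum_by_user(grades):
--     grade = {}
--     for row in grades:
--         uid = row[3]
--         if uid not in grade:
--             grade[uid] = [0, 0]
--         grade[uid][0] += row[0]
--         grade[uid][1] += row[1]
--     return [grade[x][0] for x in grade]
-- ===== SOURCE B (Python) =====
-- def sum_by_user(grades):
--     uids = list(dict.fromkeys(row[3] for row in grades))
--     return [sum(row[0] for row in grades if row[3] == uid) for uid in uids]
-- ===== Notes on version B (the rewrite author's own statement) =====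
-- stated objective: alternative
-- what changed: Replaces A's single grouping pass over a dict of running [sum0, sum1] pairs with an index-first nested scan: dedup the user ids in first-appearance order, then re-scan the rows once per user summing only column 0 (A's column-1 accumulation is dead and dropped).
import Mathlib
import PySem

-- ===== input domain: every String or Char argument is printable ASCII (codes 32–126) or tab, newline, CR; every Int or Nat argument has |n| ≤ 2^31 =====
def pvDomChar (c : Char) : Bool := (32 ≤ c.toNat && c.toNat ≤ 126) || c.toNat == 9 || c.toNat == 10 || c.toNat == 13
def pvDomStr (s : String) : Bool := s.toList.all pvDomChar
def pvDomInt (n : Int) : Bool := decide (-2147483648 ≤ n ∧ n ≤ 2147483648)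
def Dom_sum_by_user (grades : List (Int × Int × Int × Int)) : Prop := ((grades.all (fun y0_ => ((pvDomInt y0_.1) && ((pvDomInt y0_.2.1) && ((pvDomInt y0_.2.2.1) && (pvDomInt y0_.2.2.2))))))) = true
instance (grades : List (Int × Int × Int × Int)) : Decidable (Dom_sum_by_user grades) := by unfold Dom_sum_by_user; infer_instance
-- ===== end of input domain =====

-- B replaces A's single grouping pass over a dict of running [sum0, sum1] pairs by an
-- index-first nested scan: collect the distinct user ids in first-appearance order, then
-- re-scan the rows once per user summing only column 0 (objective: alternative decomposition).

-- ===== PORT A =====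
-- one loop iteration of A: setdefault-style insert, then accumulate both columns
def sum_by_user_step (d : PySem.Dict Int (Int × Int)) (row : Int × Int × Int × Int) :
    PySem.Dict Int (Int × Int) :=
  let uid := row.2.2.2
  let d' := if d.contains uid then d else d.insert uid (0, 0)
  d'.modify uid (0, 0) (fun p => (p.1 + row.1, p.2 + row.2.1))

def sum_by_user (grades : List (Int × Int × Int × Int)) : List Int :=
  let grade := grades.foldl sum_by_user_step PySem.Dict.empty
  grade.keys.map (fun x => (grade.getD x (0, 0)).1)

-- ===== PORT B =====
def sum_by_user_alt (grades : List (Int × Int × Int × Int)) : List Int :=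
  let uids := PySem.List.dedup (grades.map (fun row => row.2.2.2))
  uids.map (fun uid =>
    ((grades.filter (fun row => row.2.2.2 == uid)).map (fun row => row.1)).sum)

-- ===== PRECONDITION & SPEC =====
def Spec_sum_by_user (grades : List (Int × Int × Int × Int)) (out : List Int) : Prop := out = sum_by_user_alt grades
instance (grades : List (Int × Int × Int × Int)) (out : List Int) : Decidable (Spec_sum_by_user grades out) := by unfold Spec_sum_by_user; infer_instance

-- ===== CLAIM (what is proved, stated in full; the proofs are below) =====
def Claim_equal_sum_by_user : Prop := ∀ (grades : List (Int × Int × Int × Int)), Dom_sum_by_user grades → Spec_sum_by_user grades (sum_by_user grades)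

-- ===== LEMMAS AND PROOFS =====

-- lookup through the conditional insert of a fresh (0,0) entry is the plain lookup
theorem getD_ifinsert (d : PySem.Dict Int (Int × Int)) (k u : Int) :
    ((if d.contains k then d else d.insert k (0, 0)) : PySem.Dict Int (Int × Int)).getD u (0, 0)
      = d.getD u (0, 0) := by
  by_cases hc : d.contains k
  · simp [hc]
  · rw [if_neg hc]
    by_cases hu : u = k
    · subst hu
      rw [PySem.Dict.getD_insert_self, PySem.Dict.getD_of_not_contains d _ (by simpa using hc)]
    · rw [PySem.Dict.getD_insert_of_ne _ _ _ hu]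

-- keys of one A-step: append the uid if new
theorem keys_step (d : PySem.Dict Int (Int × Int)) (row : Int × Int × Int × Int) :
    (sum_by_user_step d row).keys = PySem.Set.add d.keys row.2.2.2 := by
  unfold sum_by_user_step
  dsimp only
  by_cases hc : d.contains row.2.2.2
  · rw [if_pos hc, PySem.Dict.keys_modify, PySem.Dict.keys_insert_of_contains _ _ hc,
      PySem.Set.add_of_mem ((PySem.Dict.contains_iff_mem_keys d _).mp hc)]
  · have hmem : row.2.2.2 ∉ d.keys := fun h => hc ((PySem.Dict.contains_iff_mem_keys d _).mpr h)
    rw [if_neg hc, PySem.Dict.keys_modify,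
      PySem.Dict.keys_insert_of_contains _ _ (PySem.Dict.contains_insert_self _ _ _),
      PySem.Dict.keys_insert_of_not_contains _ _ (by simpa using hc),
      PySem.Set.add_of_not_mem hmem]

-- keys of A's whole fold: the distinct uids appended in first-appearance order
theorem keys_fold (l : List (Int × Int × Int × Int)) (d : PySem.Dict Int (Int × Int)) :
    (l.foldl sum_by_user_step d).keys = PySem.Set.update d.keys (l.map (·.2.2.2)) := by
  induction l generalizing d with
  | nil => simp [PySem.Set.update]
  | cons r t ih =>
    simp only [List.foldl_cons, List.map_cons, PySem.Set.update_cons, ih, keys_step]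

-- value of A's fold at a uid: base value plus the column sums of that uid's rows
theorem getD_fold (l : List (Int × Int × Int × Int)) (d : PySem.Dict Int (Int × Int)) (u : Int) :
    (l.foldl sum_by_user_step d).getD u (0, 0)
      = ((d.getD u (0, 0)).1 + ((l.filter (fun r => r.2.2.2 == u)).map (fun r => r.1)).sum,
         (d.getD u (0, 0)).2 + ((l.filter (fun r => r.2.2.2 == u)).map (fun r => r.2.1)).sum) := by
  induction l generalizing d with
  | nil => simp
  | cons r t ih =>
    simp only [List.foldl_cons, ih, List.filter_cons]
    by_cases hu : r.2.2.2 = u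
    · simp only [hu, beq_self_eq_true, if_pos]
      unfold sum_by_user_step
      dsimp only
      rw [hu, PySem.Dict.getD_modify_self, getD_ifinsert]
      simp [add_assoc, add_comm, add_left_comm]
    · have hne : (r.2.2.2 == u) = false := by simpa using hu
      simp only [hne, Bool.false_eq_true, if_false]
      unfold sum_by_user_step
      dsimp only
      rw [PySem.Dict.getD_modify_of_ne _ _ _ (Ne.symm hu), getD_ifinsert]

-- ===== VERDICT (by name: the statement is the Claim_ definition above) =====
theorem sum_by_user_spec : Claim_equal_sum_by_user := by
  intro grades _
  unfold Spec_sum_by_user sum_by_user sum_by_user_alt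
  dsimp only
  rw [keys_fold]
  simp only [PySem.Dict.keys_empty, PySem.Set.update_nil_left, PySem.List.dedup_eq_ofList]
  refine List.map_congr_left (fun u _ => ?_)
  rw [getD_fold]
  simp
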